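-- pv_equiv track=rewrite | github.com/oneforawe/code-practice | Python/HackerRank/InterviewPrepKit/WarmUp/JumpingOnTheClouds/JumpingOnTheClouds.py | jumpingOnClouds
-- ===== SOURCE A (Python) =====
-- def jumpingOnClouds(c):
--     # Cumulus cloud (safe) = 0
--     # Thunderhead (avoid) = 1
--     # Assuming there is a solution, Emma needs
--     # to always jump 2 ahead when possible
--     # and 1 ahead when not.
--     jump_count = 0
--     index = 0 # starting at first cloud
--     while index <= len(c)-3:
--         if c[index+1] == 0:
--             # Can jump to next, but what about further?
--             if c[index+2] == 0:
--                 # Can jump by 2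
--                 index += 2
--             else:
--                 # Can only jump by 1
--                 index += 1
--         else:
--             # Can't jump to next; must jump over.
--             index += 2
--         jump_count += 1
--     # If at index len(c)-2 (2nd to last)
--     if index == len(c)-2:
--         # Must jump once more
--         jump_count += 1
--
--     return jump_count
-- ===== SOURCE B (Python) =====
-- def jumpingOnClouds(c):
--     # Right-to-left DP scan: a1/a2 carry the jump counts from the next two
--     # positions; c1/c2 carry the next two cloud values. No index arithmetic.
--     if len(c) <= 1:
--         return 0
--     a1, a2 = 1, 0
--     c2, c1 = c[-1], c[-2]
--     for x in reversed(c[:-2]):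
--         a1, a2 = 1 + (a1 if c1 == 0 and c2 != 0 else a2), a1
--         c1, c2 = x, c1
--     return a1
-- ===== Notes on version B (the rewrite author's own statement) =====
-- stated objective: alternative
-- what changed: Replaced A's forward greedy walk with its post-loop tail correction by a single right-to-left DP scan that carries the jump counts of the next two positions (and the next two cloud values) and needs no index arithmetic or tail fix-up.
import Mathlib
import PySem

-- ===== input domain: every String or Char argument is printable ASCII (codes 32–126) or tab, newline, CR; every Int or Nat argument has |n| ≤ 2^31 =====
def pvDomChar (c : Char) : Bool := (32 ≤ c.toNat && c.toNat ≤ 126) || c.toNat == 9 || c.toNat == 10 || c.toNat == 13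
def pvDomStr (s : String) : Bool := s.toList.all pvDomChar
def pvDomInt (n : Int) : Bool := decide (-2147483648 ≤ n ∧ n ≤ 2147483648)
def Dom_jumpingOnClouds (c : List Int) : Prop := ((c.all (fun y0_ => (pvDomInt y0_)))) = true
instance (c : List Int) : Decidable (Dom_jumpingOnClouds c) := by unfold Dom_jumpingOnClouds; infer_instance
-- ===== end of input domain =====

-- B replaces A's forward greedy walk (separate post-loop tail fix) by a right-to-left
-- DP scan carrying the jump counts of the next two positions; objective: alternative.

-- ===== PORT A =====
-- while loop of A: state (index, jump_count); terminates since index strictly increases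
def jocGo (c : List Int) (index jump_count : Int) : Int :=
  if _h : index ≤ (c.length : Int) - 3 then
    if (PySem.List.pyGet? c (index + 1)).getD 0 = 0 then
      if (PySem.List.pyGet? c (index + 2)).getD 0 = 0 then
        jocGo c (index + 2) (jump_count + 1)
      else
        jocGo c (index + 1) (jump_count + 1)
    else
      jocGo c (index + 2) (jump_count + 1)
  else
    if index = (c.length : Int) - 2 then jump_count + 1 else jump_count
termination_by ((c.length : Int) - index).toNat
decreasing_by all_goals omega

def jumpingOnClouds (c : List Int) : Int := jocGo c 0 0

-- ===== PORT B =====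
-- one fold step of Source B's loop body, state (a1, a2, c1, c2)
def jocStep (st : Int × Int × Int × Int) (x : Int) : Int × Int × Int × Int :=
  (1 + (if st.2.2.1 = 0 ∧ st.2.2.2 ≠ 0 then st.1 else st.2.1), st.1, x, st.2.2.1)

def jumpingOnClouds_alt (c : List Int) : Int :=
  if (c.length : Int) ≤ 1 then 0
  else
    let c2 := (PySem.List.pyGet? c (-1)).getD 0
    let c1 := (PySem.List.pyGet? c (-2)).getD 0
    let st := (PySem.List.slice c none (some (-2))).reverse.foldl jocStep (1, 0, c1, c2)
    st.1

-- ===== PRECONDITION & SPEC =====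
def Spec_jumpingOnClouds (c : List Int) (out : Int) : Prop := out = jumpingOnClouds_alt c
instance (c : List Int) (out : Int) : Decidable (Spec_jumpingOnClouds c out) := by unfold Spec_jumpingOnClouds; infer_instance

-- ===== CLAIM (what is proved, stated in full; the proofs are below) =====
def Claim_equal_jumpingOnClouds : Prop := ∀ (c : List Int), Dom_jumpingOnClouds c → Spec_jumpingOnClouds c (jumpingOnClouds c)

-- ===== LEMMAS AND PROOFS =====

-- reference: jump count of A's deterministic walk, as structural recursion on the suffix
def fJoc : List Int → Int
  | [] => 0
  | [_] => 0
  | [_, _] => 1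
  | _ :: b :: d :: t => 1 + (if b = 0 ∧ d ≠ 0 then fJoc (b :: d :: t) else fJoc (d :: t))

theorem fJoc_short (l : List Int) (h : l.length ≤ 1) : fJoc l = 0 := by
  match l, h with
  | [], _ => rfl
  | [_], _ => rfl

theorem fJoc_len2 (l : List Int) (h : l.length = 2) : fJoc l = 1 := by
  match l, h with
  | [_, _], _ => rfl

theorem jocGo_eq_fJoc (c : List Int) (i k : Int) (h0 : 0 ≤ i) (h1 : i ≤ (c.length : Int)) :
    jocGo c i k = k + fJoc (c.drop i.toNat) := by
  by_cases h : i ≤ (c.length : Int) - 3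
  · -- the suffix has at least 3 elements
    have hlen : 3 ≤ (c.drop i.toNat).length := by
      simp only [List.length_drop]; omega
    obtain ⟨a, b, d, t, hs⟩ : ∃ a b d t, c.drop i.toNat = a :: b :: d :: t := by
      match hsuf : c.drop i.toNat, hlen with
      | a :: b :: d :: t, _ => exact ⟨a, b, d, t, rfl⟩
    have hb : PySem.List.pyGet? c (i + 1) = some b := by
      rw [PySem.List.pyGet?_of_nonneg c (i := i + 1) (by omega)]
      have e : (i + 1).toNat = i.toNat + 1 := by omega
      rw [e, ← List.getElem?_drop, hs]
      rfl
    have hd : PySem.List.pyGet? c (i + 2) = some d := by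
      rw [PySem.List.pyGet?_of_nonneg c (i := i + 2) (by omega)]
      have e : (i + 2).toNat = i.toNat + 2 := by omega
      rw [e, ← List.getElem?_drop, hs]
      rfl
    have hdrop1 : c.drop (i + 1).toNat = b :: d :: t := by
      have e : (i + 1).toNat = i.toNat + 1 := by omega
      rw [e, ← List.drop_drop, hs]
      rfl
    have hdrop2 : c.drop (i + 2).toNat = d :: t := by
      have e : (i + 2).toNat = i.toNat + 2 := by omega
      rw [e, ← List.drop_drop, hs]
      rfl
    have ih1 := jocGo_eq_fJoc c (i + 1) (k + 1) (by omega) (by omega)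
    have ih2 := jocGo_eq_fJoc c (i + 2) (k + 1) (by omega) (by omega)
    rw [jocGo, dif_pos h, hb, hd, hs]
    simp only [Option.getD_some]
    by_cases hb0 : b = 0
    · by_cases hd0 : d = 0
      · rw [if_pos hb0, if_pos hd0, ih2, hdrop2, fJoc,
          if_neg (by simp [hd0])]
        ring
      · rw [if_pos hb0, if_neg hd0, ih1, hdrop1, fJoc, if_pos ⟨hb0, hd0⟩]
        ring
    · rw [if_neg hb0, ih2, hdrop2, fJoc, if_neg (by tauto)]
      ring
  · -- suffix has at most 2 elements
    rw [jocGo, dif_neg h]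
    by_cases h2 : i = (c.length : Int) - 2
    · rw [if_pos h2, fJoc_len2 _ (by simp only [List.length_drop]; omega)]
    · rw [if_neg h2, fJoc_short _ (by simp only [List.length_drop]; omega)]
      ring
termination_by ((c.length : Int) - i).toNat
decreasing_by all_goals omega

theorem foldr_step_eq (l : List Int) (p q : Int) :
    l.foldr (fun x st => jocStep st x) (1, 0, p, q) =
      (fJoc (l ++ [p, q]), fJoc (l ++ [p, q]).tail,
        (l ++ [p, q]).headD 0, (l ++ [p, q]).tail.headD 0) := by
  induction l with
  | nil => simp [fJoc]
  | cons x l ih =>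
    obtain ⟨b, d, t, hs⟩ : ∃ b d t, l ++ [p, q] = b :: d :: t := by
      match hh : l ++ [p, q], (show 2 ≤ (l ++ [p, q]).length by simp) with
      | b :: d :: t, _ => exact ⟨b, d, t, rfl⟩
    simp only [List.foldr_cons, ih, List.cons_append]
    rw [hs]
    simp [jocStep, fJoc]

theorem exists_two_last (c : List Int) (h : 2 ≤ c.length) : ∃ l p q, c = l ++ [p, q] := by
  have hr := c.reverse_reverse
  match hrev : c.reverse, (show 2 ≤ c.reverse.length by simpa) with
  | q :: p :: r, _ =>
    exact ⟨r.reverse, p, q, by rw [← hr, hrev]; simp⟩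

theorem jumpingOnClouds_spec_aux (c : List Int) : jumpingOnClouds c = jumpingOnClouds_alt c := by
  have hA : jumpingOnClouds c = fJoc c := by
    have := jocGo_eq_fJoc c 0 0 (by omega) (by omega)
    simpa [jumpingOnClouds] using this
  rw [hA, jumpingOnClouds_alt]
  by_cases hlen : (c.length : Int) ≤ 1
  · rw [if_pos hlen, fJoc_short c (by omega)]
  · rw [if_neg hlen]
    obtain ⟨l, p, q, hc⟩ := exists_two_last c (by omega)
    subst hc
    have hq : (PySem.List.pyGet? (l ++ [p, q]) (-1)).getD 0 = q := by
      have e : l ++ [p, q] = (l ++ [p]) ++ [q] := by simp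
      rw [e, PySem.List.pyGet?_neg_one_append_singleton]
      rfl
    have hp : (PySem.List.pyGet? (l ++ [p, q]) (-2)).getD 0 = p := by
      rw [PySem.List.pyGet?_neg_ofNat _ 2 (by omega) (by simp)]
      have e : (l ++ [p, q]).length - 2 = l.length := by simp
      rw [e, List.getElem?_append_right (by omega)]
      simp
    have hsl : PySem.List.slice (l ++ [p, q]) none (some (-2)) = l := by
      have e2 : ((-2 : Int)) = -((2 : Nat) : Int) := by norm_num
      rw [e2, PySem.List.slice_to_neg_natCast _ 2 (by omega)]
      have e : (l ++ [p, q]).length - 2 = l.length := by simp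
      rw [e]
      exact List.take_left
    simp only [hq, hp, hsl, List.foldl_reverse, foldr_step_eq]

-- ===== VERDICT (by name: the statement is the Claim_ definition above) =====
theorem jumpingOnClouds_spec : Claim_equal_jumpingOnClouds := by
  intro c _
  exact jumpingOnClouds_spec_aux c
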